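-- pv_equiv track=rewrite | github.com/josephgiardello-cloud/Dad-Bot | dadbot/managers/memory_query.py | format_memories_for_reply
-- ===== SOURCE A (Python) =====
-- def format_memories_for_reply(memories):
-- 	if not memories:
-- 		return ""
--
-- 	grouped = {}
-- 	for memory in memories:
-- 		category = memory.get("category", "general").title()
-- 		grouped.setdefault(category, []).append(memory["summary"].rstrip("."))
--
-- 	parts = []
-- 	for category, summaries in grouped.items():
-- 		parts.append(f"{category}: {'; '.join(summaries)}")
--
-- 	return " | ".join(parts)
-- ===== SOURCE B (Python) =====
-- def format_memories_for_reply(memories):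
-- 	if not memories:
-- 		return ""
--
-- 	seen = set()
-- 	categories = []
-- 	for memory in memories:
-- 		category = memory.get("category", "general").title()
-- 		if category not in seen:
-- 			seen.add(category)
-- 			categories.append(category)
--
-- 	parts = [
-- 		category + ": " + "; ".join(
-- 			memory["summary"].rstrip(".")
-- 			for memory in memories
-- 			if memory.get("category", "general").title() == category
-- 		)
-- 		for category in categories
-- 	]
-- 	return " | ".join(parts)
-- ===== Notes on version B (the rewrite author's own statement) =====
-- stated objective: alternative
-- what changed: Replaces the dict-of-lists single-pass grouping by an ordered seen-set index of distinct titled categories followed by one filtering scan per category; the dict and its setdefault/append mutation disappear.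
import Mathlib
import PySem

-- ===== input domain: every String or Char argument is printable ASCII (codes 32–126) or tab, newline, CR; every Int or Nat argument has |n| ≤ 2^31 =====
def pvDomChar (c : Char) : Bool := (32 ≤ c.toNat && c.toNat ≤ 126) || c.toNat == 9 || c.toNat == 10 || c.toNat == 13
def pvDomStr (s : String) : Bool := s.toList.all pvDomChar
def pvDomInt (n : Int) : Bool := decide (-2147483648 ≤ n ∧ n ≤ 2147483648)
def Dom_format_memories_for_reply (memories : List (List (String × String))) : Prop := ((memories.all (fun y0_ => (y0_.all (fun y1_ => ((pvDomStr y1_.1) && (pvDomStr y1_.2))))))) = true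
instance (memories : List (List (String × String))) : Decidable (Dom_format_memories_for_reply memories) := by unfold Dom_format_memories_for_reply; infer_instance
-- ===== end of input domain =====

-- B replaces A's dict-of-lists grouping with an ordered index of distinct categories plus one
-- filtering scan per category (objective: alternative decomposition, no speed claim).

-- shared per-memory expressions (used verbatim by both Pythons):
-- str.title(), ported by hand (exact on the ASCII domain: a char is uppercased iff the
-- previous char is not a letter, lowercased otherwise; non-letters pass through)
def pvTitleAux : Bool → List Char → List Char
  | _, [] => []
  | prevCased, c :: cs =>
    if PySem.Chars.isalpha c then
      (if prevCased then PySem.Chars.lowerChar c else PySem.Chars.upperChar c) :: pvTitleAux true cs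
    else c :: pvTitleAux false cs

def pvTitle (s : String) : String := String.ofList (pvTitleAux false s.toList)

-- s.rstrip("."), ported by hand (exact: drop trailing '.' characters)
def pvRstripDot (s : String) : String := String.ofList ((s.toList.reverse.dropWhile (· == '.')).reverse)

-- memory.get("category", "general").title()
def pvKey (m : List (String × String)) : String :=
  pvTitle (PySem.Dict.getD ⟨m⟩ "category" "general")

-- memory["summary"].rstrip(".") — the "" default is never read under Pre_ (KeyError excluded there)
def pvVal (m : List (String × String)) : String :=
  pvRstripDot (PySem.Dict.getD ⟨m⟩ "summary" "")

-- ===== PORT A =====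
def format_memories_for_reply (memories : List (List (String × String))) : String :=
  if memories.isEmpty then ""
  else
    let grouped : PySem.Dict String (List String) :=
      memories.foldl (fun d m => d.modify (pvKey m) [] (fun ss => ss ++ [pvVal m])) PySem.Dict.empty
    let parts : List String :=
      grouped.items.foldl (fun acc p => acc ++ [p.1 ++ ": " ++ PySem.Str.join "; " p.2]) []
    PySem.Str.join " | " parts

-- ===== PORT B =====
def format_memories_for_reply_alt (memories : List (List (String × String))) : String :=
  if memories.isEmpty then ""
  else
    let categories : PySem.Set String :=
      memories.foldl (fun s m => PySem.Set.add s (pvKey m)) PySem.Set.empty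
    let parts : List String :=
      categories.map (fun c =>
        c ++ ": " ++ PySem.Str.join "; " ((memories.filter (fun m => pvKey m == c)).map pvVal))
    PySem.Str.join " | " parts

-- ===== PRECONDITION & SPEC =====
-- Pre_ excludes exactly the inputs where the Python A raises KeyError: a memory without a "summary" key.
def Pre_format_memories_for_reply (memories : List (List (String × String))) : Prop :=
  ∀ m ∈ memories, PySem.Dict.contains (⟨m⟩ : PySem.Dict String String) "summary" = true
instance (memories : List (List (String × String))) : Decidable (Pre_format_memories_for_reply memories) := by unfold Pre_format_memories_for_reply; infer_instance

def pvWitness_format_memories_for_reply : (List (List (String × String))) :=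
  [[("category", "work"), ("summary", "met Bob.")], [("summary", "ate lunch")]]

def Spec_format_memories_for_reply (memories : List (List (String × String))) (out : String) : Prop := out = format_memories_for_reply_alt memories
instance (memories : List (List (String × String))) (out : String) : Decidable (Spec_format_memories_for_reply memories out) := by unfold Spec_format_memories_for_reply; infer_instance

-- ===== CLAIM (what is proved, stated in full; the proofs are below) =====
def Claim_equal_format_memories_for_reply : Prop := ∀ (memories : List (List (String × String))), Dom_format_memories_for_reply memories → Pre_format_memories_for_reply memories → Spec_format_memories_for_reply memories (format_memories_for_reply memories)

-- ===== LEMMAS AND PROOFS =====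

-- A's grouping fold, written over (key, value) pairs so the library modify-append lemma applies.
theorem pv_grouped_eq (memories : List (List (String × String))) :
    memories.foldl (fun d m => PySem.Dict.modify d (pvKey m) [] (fun ss => ss ++ [pvVal m]))
      PySem.Dict.empty
    = (memories.map (fun m => (pvKey m, pvVal m))).foldl
        (fun d p => PySem.Dict.modify d p.1 [] (fun ss => ss ++ [p.2])) PySem.Dict.empty := by
  rw [List.foldl_map]

theorem pv_keys_grouped (memories : List (List (String × String))) :
    (memories.foldl (fun d m => PySem.Dict.modify d (pvKey m) [] (fun ss => ss ++ [pvVal m]))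
      PySem.Dict.empty).keys
    = memories.foldl (fun s m => PySem.Set.add s (pvKey m)) PySem.Set.empty := by
  rw [PySem.Dict.keys_foldl_modify_key memories pvKey [] (fun _ m ss => ss ++ [pvVal m])]
  simp [PySem.Set.update, PySem.Dict.keys_empty, List.foldl_map, PySem.Set.empty]

theorem pv_getD_grouped (memories : List (List (String × String))) (c : String) :
    (memories.foldl (fun d m => PySem.Dict.modify d (pvKey m) [] (fun ss => ss ++ [pvVal m]))
      PySem.Dict.empty).getD c []
    = ((memories.filter (fun m => pvKey m == c)).map pvVal) := by
  rw [pv_grouped_eq, PySem.Dict.getD_foldl_modify_append]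
  simp [PySem.Dict.getD_empty, List.filter_map, List.map_map, Function.comp_def]

-- ===== VERDICT (by name: the statement is the Claim_ definition above) =====
theorem format_memories_for_reply_spec : Claim_equal_format_memories_for_reply := by
  intro memories _ _
  unfold Spec_format_memories_for_reply format_memories_for_reply format_memories_for_reply_alt
  by_cases h : memories.isEmpty
  · simp [h]
  · have hcats : memories.foldl (fun s m => PySem.Set.add s (pvKey m)) PySem.Set.empty
        = PySem.Set.ofList (memories.map pvKey) := by
      rw [PySem.Set.ofList_eq_foldl, List.foldl_map]; rfl
    have hnd : (memories.foldl (fun d m => PySem.Dict.modify d (pvKey m) [] (fun ss => ss ++ [pvVal m]))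
        PySem.Dict.empty).keys.Nodup := by
      rw [pv_keys_grouped, hcats]; exact PySem.Set.nodup_ofList _
    simp only [h]
    rw [PySem.List.foldl_append_singleton_eq_map, List.nil_append,
        PySem.Dict.items_eq_map_keys _ hnd ([] : List String), List.map_map, pv_keys_grouped]
    exact congrArg (PySem.Str.join " | ") (List.map_congr_left (fun c _ => by
      simp only [Function.comp_apply]; rw [pv_getD_grouped]))
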